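-- pv_equiv track=rewrite | github.com/ssgzy/new-task | scripts/run_qualification_v1.py | filter_registry
-- ===== SOURCE A (Python) =====
-- from typing import Any, Dict, List
--
-- def filter_registry(registry: List[Dict[str, Any]], groups: List[str], labels: List[str]) -> List[Dict[str, Any]]:
--     selected = list(registry)
--
--     if groups:
--         allowed_groups = set(groups)
--         selected = [model for model in selected if model["group"] in allowed_groups]
--
--     if labels:
--         available_labels = {model["label"] for model in registry}
--         missing_labels = [label for label in labels if label not in available_labels]
--         if missing_labels:
--             raise SystemExit(f"Unknown model labels: {', '.join(missing_labels)}")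
--         allowed_labels = set(labels)
--         selected = [model for model in selected if model["label"] in allowed_labels]
--
--     if not selected:
--         raise SystemExit("No models matched the provided --groups/--labels filters.")
--     return selected
-- ===== SOURCE B (Python) =====
-- def filter_registry(registry, groups, labels):
--     # Inverted index: map each key value to the posting list of registry indices,
--     # then select by set algebra over index sets instead of per-model membership tests.
--     keep = set(range(len(registry)))
--
--     if groups:
--         index = {}
--         for i, model in enumerate(registry):
--             index.setdefault(model["group"], []).append(i)
--         keep &= {i for g in groups for i in index.get(g, [])}
--
--     if labels:
--         index = {}
--         for i, model in enumerate(registry):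
--             index.setdefault(model["label"], []).append(i)
--         missing = [label for label in labels if label not in index]
--         if missing:
--             raise SystemExit(f"Unknown model labels: {', '.join(missing)}")
--         keep &= {i for label in labels for i in index.get(label, [])}
--
--     selected = [model for i, model in enumerate(registry) if i in keep]
--     if not selected:
--         raise SystemExit("No models matched the provided --groups/--labels filters.")
--     return selected
-- ===== Notes on version B (the rewrite author's own statement) =====
-- stated objective: alternative
-- what changed: B builds an inverted index (key value -> posting list of registry indices) once per criterion and selects by set algebra on index sets (range-set intersected with unions of posting lists), instead of A's per-model set-membership filter passes.
import Mathlib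
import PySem

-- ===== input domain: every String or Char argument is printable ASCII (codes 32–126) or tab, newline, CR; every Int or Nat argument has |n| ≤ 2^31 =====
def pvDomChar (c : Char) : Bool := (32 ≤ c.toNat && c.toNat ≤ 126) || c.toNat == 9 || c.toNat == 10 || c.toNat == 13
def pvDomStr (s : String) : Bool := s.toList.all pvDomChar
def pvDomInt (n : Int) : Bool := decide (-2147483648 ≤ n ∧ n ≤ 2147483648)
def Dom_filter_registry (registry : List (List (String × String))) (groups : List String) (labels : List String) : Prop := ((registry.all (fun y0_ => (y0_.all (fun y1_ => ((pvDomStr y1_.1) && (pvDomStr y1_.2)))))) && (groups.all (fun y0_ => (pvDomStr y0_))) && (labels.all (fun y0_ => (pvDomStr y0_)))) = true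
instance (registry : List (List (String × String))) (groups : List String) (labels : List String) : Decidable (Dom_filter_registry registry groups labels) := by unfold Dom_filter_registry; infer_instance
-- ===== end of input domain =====

-- B replaces A's per-model set-membership filtering by an inverted index (key value → posting
-- list of registry indices) and set algebra over index sets (objective: alternative).


-- Python dict lookup m[k] on an association list: first match; none = KeyError (excluded by Pre_).
def pvLookup (m : List (String × String)) (k : String) : Option String :=
  (m.find? (fun p => p.1 == k)).map (·.2)

-- ===== PORT A =====
-- The SystemExit paths (unknown labels, empty result) return no value: those inputs are outside Pre_.
def filter_registry (registry : List (List (String × String))) (groups : List String) (labels : List String) : List (List (String × String)) :=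
  let selected := registry
  let selected := if groups.isEmpty then selected else
    let allowed_groups := PySem.Set.ofList groups
    selected.filter (fun m => match pvLookup m "group" with
      | some g => PySem.Set.contains allowed_groups g
      | none => false)
  let selected := if labels.isEmpty then selected else
    let allowed_labels := PySem.Set.ofList labels
    selected.filter (fun m => match pvLookup m "label" with
      | some l => PySem.Set.contains allowed_labels l
      | none => false)
  selected

-- ===== PORT B =====
-- Source B's inverted-index build loop (`index.setdefault(model[key], []).append(i)` over
-- enumerate(registry)), used once per key; a none lookup (KeyError in Python) is outside Pre_.
def pvIndex (registry : List (List (String × String))) (key : String) : PySem.Dict String (List Int) :=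
  (PySem.List.enumerate registry 0).foldl
    (fun d im => match pvLookup im.2 key with
      | some v => d.modify v [] (fun l => l ++ [im.1])
      | none => d)
    PySem.Dict.empty

-- keep = set(range(n)), intersected with the union of the posting lists of the wanted
-- groups/labels; the result is the models whose index is in keep, in registry order.
-- (The missing-labels SystemExit path returns no value: outside Pre_.)
def filter_registry_alt (registry : List (List (String × String))) (groups : List String) (labels : List String) : List (List (String × String)) :=
  let keep := PySem.Set.ofList (PySem.List.pyRange 0 registry.length 1)
  let keep := if groups.isEmpty then keep else
    let index := pvIndex registry "group"
    PySem.Set.inter keep (PySem.Set.ofList (groups.flatMap (fun g => index.getD g [])))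
  let keep := if labels.isEmpty then keep else
    let index := pvIndex registry "label"
    PySem.Set.inter keep (PySem.Set.ofList (labels.flatMap (fun l => index.getD l [])))
  ((PySem.List.enumerate registry 0).filter (fun im => PySem.Set.contains keep im.1)).map (·.2)

-- ===== PRECONDITION & SPEC =====
-- Pre_ excludes exactly the inputs on which Python A raises: KeyError (a consulted model lacks
-- the "group"/"label" key), SystemExit on unknown labels, and SystemExit on an empty result.
def Pre_filter_registry (registry : List (List (String × String))) (groups : List String) (labels : List String) : Prop :=
  (groups ≠ [] → ∀ m ∈ registry, (pvLookup m "group").isSome) ∧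
  (labels ≠ [] → (∀ m ∈ registry, (pvLookup m "label").isSome) ∧
                 (∀ l ∈ labels, ∃ m ∈ registry, pvLookup m "label" = some l)) ∧
  (∃ m ∈ registry,
     (groups = [] ∨ ∃ g ∈ groups, pvLookup m "group" = some g) ∧
     (labels = [] ∨ ∃ l ∈ labels, pvLookup m "label" = some l))
instance (registry : List (List (String × String))) (groups : List String) (labels : List String) : Decidable (Pre_filter_registry registry groups labels) := by unfold Pre_filter_registry; infer_instance

def pvWitness_filter_registry : (List (List (String × String))) × List String × List String :=
  ([[("group", "g1"), ("label", "l1")]], ["g1"], ["l1"])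

def Spec_filter_registry (registry : List (List (String × String))) (groups : List String) (labels : List String) (out : List (List (String × String))) : Prop := out = filter_registry_alt registry groups labels
instance (registry : List (List (String × String))) (groups : List String) (labels : List String) (out : List (List (String × String))) : Decidable (Spec_filter_registry registry groups labels out) := by unfold Spec_filter_registry; infer_instance

-- ===== CLAIM (what is proved, stated in full; the proofs are below) =====
def Claim_equal_filter_registry : Prop := ∀ (registry : List (List (String × String))) (groups : List String) (labels : List String), Dom_filter_registry registry groups labels → Pre_filter_registry registry groups labels → Spec_filter_registry registry groups labels (filter_registry registry groups labels)

-- ===== LEMMAS AND PROOFS =====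

theorem pvIndex_build (l : List (List (String × String))) (key v : String) :
    ∀ (s : Int) (d : PySem.Dict String (List Int)),
    ((PySem.List.enumerate l s).foldl
      (fun d im => match pvLookup im.2 key with
        | some w => d.modify w [] (fun t => t ++ [im.1])
        | none => d) d).getD v [] =
      d.getD v [] ++
      ((PySem.List.enumerate l s).filter (fun im => pvLookup im.2 key == some v)).map (·.1) := by
  induction l with
  | nil => intro s d; simp [PySem.List.enumerate_nil]
  | cons m rest ih =>
    intro s d
    rw [PySem.List.enumerate_cons]
    simp only [List.foldl_cons, List.filter_cons]
    cases hw : pvLookup m key with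
    | none => simp [ih]
    | some w =>
      by_cases hv : w = v
      · subst hv
        simp only [ih, PySem.Dict.getD_modify_self]
        simp
      · simp only [ih]
        rw [PySem.Dict.getD_modify_of_ne]
        · simp [hv]
        · exact fun hc => hv hc.symm

-- membership in a posting list
theorem mem_pvIndex_getD (registry : List (List (String × String))) (key v : String) (i : Int) :
    i ∈ (pvIndex registry key).getD v [] ↔
      ∃ m, (i, m) ∈ PySem.List.enumerate registry 0 ∧ pvLookup m key = some v := by
  unfold pvIndex
  rw [pvIndex_build]
  simp only [PySem.Dict.getD_empty, List.nil_append, List.mem_map, List.mem_filter]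
  constructor
  · rintro ⟨⟨j, m⟩, ⟨hmem, hlk⟩, rfl⟩
    exact ⟨m, hmem, by simpa using hlk⟩
  · rintro ⟨m, hmem, hlk⟩
    exact ⟨(i, m), ⟨hmem, by simp [hlk]⟩, rfl⟩

-- an index occurs at most once in enumerate
theorem enumerate_inj (registry : List (List (String × String))) (i : Int)
    (m m' : List (String × String))
    (h : (i, m) ∈ PySem.List.enumerate registry 0)
    (h' : (i, m') ∈ PySem.List.enumerate registry 0) : m = m' := by
  rw [PySem.List.mem_enumerate_iff] at h h'
  rcases h with ⟨k, hk, hp⟩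
  rcases h' with ⟨k', hk', hp'⟩
  have h1 : (0 : Int) + k = i := by cases hp; rfl
  have h2 : (0 : Int) + k' = i := by cases hp'; rfl
  have : k = k' := by omega
  subst this
  cases hp; cases hp'; rfl

-- the per-key predicate A uses
def pvPred (vals : List String) (key : String) (m : List (String × String)) : Bool :=
  match pvLookup m key with
  | some w => PySem.Set.contains (PySem.Set.ofList vals) w
  | none => false

theorem pvPred_iff (vals : List String) (key : String) (m : List (String × String)) :
    pvPred vals key m = true ↔ ∃ g ∈ vals, pvLookup m key = some g := by
  unfold pvPred
  cases h : pvLookup m key with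
  | none => simp
  | some w =>
    simp only [PySem.Set.contains_iff, PySem.Set.mem_ofList, Option.some.injEq]
    constructor
    · intro hw; exact ⟨w, hw, rfl⟩
    · rintro ⟨g, hg, he⟩; cases he; exact hg

-- membership in the union of posting lists
theorem mem_union_postings (registry : List (List (String × String))) (vals : List String)
    (key : String) (i : Int) (m : List (String × String))
    (him : (i, m) ∈ PySem.List.enumerate registry 0) :
    (i ∈ PySem.Set.ofList (vals.flatMap (fun g => (pvIndex registry key).getD g []))) ↔
      pvPred vals key m = true := by
  rw [PySem.Set.mem_ofList, List.mem_flatMap, pvPred_iff]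
  constructor
  · rintro ⟨g, hg, hi⟩
    rcases (mem_pvIndex_getD registry key g i).mp hi with ⟨m', hm', hlk⟩
    exact ⟨g, hg, (enumerate_inj registry i m m' him hm') ▸ hlk⟩
  · rintro ⟨g, hg, hlk⟩
    exact ⟨g, hg, (mem_pvIndex_getD registry key g i).mpr ⟨m, him, hlk⟩⟩

theorem keep_contains (registry : List (List (String × String))) (groups labels : List String)
    (i : Int) (m : List (String × String))
    (him : (i, m) ∈ PySem.List.enumerate registry 0) :
    PySem.Set.contains
      (let keep := PySem.Set.ofList (PySem.List.pyRange 0 registry.length 1)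
       let keep := if groups.isEmpty then keep else
         PySem.Set.inter keep (PySem.Set.ofList (groups.flatMap (fun g => (pvIndex registry "group").getD g [])))
       if labels.isEmpty then keep else
         PySem.Set.inter keep (PySem.Set.ofList (labels.flatMap (fun l => (pvIndex registry "label").getD l []))))
      i
    = ((groups.isEmpty || pvPred groups "group" m) && (labels.isEmpty || pvPred labels "label" m)) := by
  have hrange : i ∈ PySem.List.pyRange 0 (registry.length : Int) 1 := by
    rw [PySem.List.mem_enumerate_iff] at him
    rcases him with ⟨k, hk, hp⟩
    have h1 : (0 : Int) + k = i := by cases hp; rfl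
    rw [PySem.List.mem_pyRange_one]
    omega
  have hG := mem_union_postings registry groups "group" i m him
  have hL := mem_union_postings registry labels "label" i m him
  rw [Bool.eq_iff_iff]
  cases hge : groups.isEmpty <;> cases hle : labels.isEmpty <;>
    simp [hge, hle, PySem.Set.contains_iff, PySem.Set.mem_inter, PySem.Set.mem_ofList] <;>
    simp only [PySem.Set.mem_ofList, List.mem_flatMap] at hG hL <;>
    rw [PySem.List.mem_pyRange_one] at hrange <;>
    (try simp only [hG, hL]) <;>
    tauto

theorem map_snd_filter_snd {α : Type} (l : List α) (s : Int) (q : α → Bool) :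
    ((PySem.List.enumerate l s).filter (fun im => q im.2)).map (·.2) = l.filter q := by
  induction l generalizing s with
  | nil => simp [PySem.List.enumerate_nil]
  | cons x xs ih =>
    rw [PySem.List.enumerate_cons]
    simp only [List.filter_cons]
    cases q x <;> simp [ih]

theorem alt_eq_filter (registry : List (List (String × String))) (groups labels : List String) :
    filter_registry_alt registry groups labels
      = registry.filter (fun m =>
          (groups.isEmpty || pvPred groups "group" m) && (labels.isEmpty || pvPred labels "label" m)) := by
  show ((PySem.List.enumerate registry 0).filter (fun im => PySem.Set.contains
      (let keep := PySem.Set.ofList (PySem.List.pyRange 0 registry.length 1)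
       let keep := if groups.isEmpty then keep else
         PySem.Set.inter keep (PySem.Set.ofList (groups.flatMap (fun g => (pvIndex registry "group").getD g [])))
       if labels.isEmpty then keep else
         PySem.Set.inter keep (PySem.Set.ofList (labels.flatMap (fun l => (pvIndex registry "label").getD l []))))
      im.1)).map (·.2) = _
  rw [List.filter_congr (fun im him => keep_contains registry groups labels im.1 im.2 him)]
  exact map_snd_filter_snd registry 0
    (fun m => (groups.isEmpty || pvPred groups "group" m) && (labels.isEmpty || pvPred labels "label" m))

theorem filter_registry_eq_alt (registry : List (List (String × String))) (groups labels : List String) :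
    filter_registry registry groups labels = filter_registry_alt registry groups labels := by
  rw [alt_eq_filter]
  unfold filter_registry
  cases hge : groups.isEmpty <;> cases hle : labels.isEmpty <;>
    simp [List.filter_filter, pvPred] <;>
    try (apply List.filter_congr; intro m _; rw [Bool.and_comm])

-- ===== VERDICT (by name: the statement is the Claim_ definition above) =====
theorem filter_registry_spec : Claim_equal_filter_registry := by
  intro registry groups labels _ _
  exact filter_registry_eq_alt registry groups labels
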